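-- pv_equiv track=rewrite | github.com/cam4ani/PhD-AnimalWelfare | UTILS.py | dico_zone_nbrminStartswith
-- ===== SOURCE A (Python) =====
-- import itertools
--
-- def dico_zone_nbrminStartswith(li, nbr_sec):
--     v = [(x[0], len(list(x[1]))) for x in itertools.groupby(li)]
--     v = [(v[i][0],sum([v[j][1] for j in range(i)])+1) for i in range(len(v))]
--     d = {}
--     for i,j in v:
--         if i not in d:
--             d[i] = []
--         d[i].append(j*nbr_sec)
--     return d
-- ===== SOURCE B (Python) =====
-- def dico_zone_nbrminStartswith(li, nbr_sec):
--     d = {}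
--     prev = object()  # sentinel unequal to anything in li
--     for i, x in enumerate(li, 1):
--         if x != prev:
--             d.setdefault(x, []).append(i * nbr_sec)
--         prev = x
--     return d
-- ===== Notes on version B (the rewrite author's own statement) =====
-- stated objective: faster
-- what changed: B replaces A's groupby pass plus quadratic per-group prefix-sum comprehension and separate dict loop by a single pass over the list that appends (index+1)*nbr_sec whenever the element differs from its predecessor.
import Mathlib
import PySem

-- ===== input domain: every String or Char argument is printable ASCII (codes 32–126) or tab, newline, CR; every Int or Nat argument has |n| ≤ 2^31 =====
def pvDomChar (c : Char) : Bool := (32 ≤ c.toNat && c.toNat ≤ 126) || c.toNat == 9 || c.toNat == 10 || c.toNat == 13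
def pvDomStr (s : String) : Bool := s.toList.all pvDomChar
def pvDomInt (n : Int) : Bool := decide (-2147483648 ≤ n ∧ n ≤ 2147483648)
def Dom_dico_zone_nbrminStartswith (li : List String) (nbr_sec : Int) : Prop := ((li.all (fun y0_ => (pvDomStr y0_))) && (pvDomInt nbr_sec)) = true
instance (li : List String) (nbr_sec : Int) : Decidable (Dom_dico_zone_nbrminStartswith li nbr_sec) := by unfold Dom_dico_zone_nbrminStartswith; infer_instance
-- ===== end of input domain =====

-- B replaces A's groupby + quadratic prefix-sum comprehension by one pass over the list
-- that records (index+1)*nbr_sec at each run start; objective: faster (O(n) vs O(n+g^2)).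

-- ===== PORT A =====
-- itertools.groupby: leading run of elements equal to x → (run length, rest)
def pvSpanEq (x : String) : List String → Int × List String
  | [] => (0, [])
  | y :: ys => if y = x then ((pvSpanEq x ys).1 + 1, (pvSpanEq x ys).2) else (0, y :: ys)

theorem pvSpanEq_len (x : String) (xs : List String) : (pvSpanEq x xs).2.length ≤ xs.length := by
  induction xs with
  | nil => simp [pvSpanEq]
  | cons y ys ih =>
    simp only [pvSpanEq]
    split
    · exact Nat.le_succ_of_le ih
    · exact Nat.le_refl _

-- [(x[0], len(list(x[1]))) for x in itertools.groupby(li)]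
def pvGroupby : List String → List (String × Int)
  | [] => []
  | x :: xs => (x, (pvSpanEq x xs).1 + 1) :: pvGroupby (pvSpanEq x xs).2
termination_by li => li.length
decreasing_by simpa using Nat.lt_succ_of_le (pvSpanEq_len x xs)

def dico_zone_nbrminStartswith (li : List String) (nbr_sec : Int) : List (String × List Int) :=
  let v0 := pvGroupby li
  -- [(v[i][0], sum([v[j][1] for j in range(i)]) + 1) for i in range(len(v))]
  let v := (PySem.List.pyRange 0 (v0.length : Int) 1).map (fun i =>
    ((PySem.List.pyGetD v0 i ("", 0)).1,
     ((PySem.List.pyRange 0 i 1).map (fun j => (PySem.List.pyGetD v0 j ("", 0)).2)).sum + 1))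
  -- for i, j in v: if i not in d: d[i] = []; d[i].append(j*nbr_sec)
  (v.foldl (fun d p =>
      (if d.contains p.1 then d else d.insert p.1 ([] : List Int)).modify p.1 []
        (fun l => l ++ [p.2 * nbr_sec])) PySem.Dict.empty).items

-- ===== PORT B =====
-- for i, x in enumerate(li, 1): if x != prev: d.setdefault(x, []).append(i*nbr_sec); prev = x
def pvAltLoop (nbr_sec : Int) : List String → Int → Option String → PySem.Dict String (List Int) → PySem.Dict String (List Int)
  | [], _, _, d => d
  | x :: xs, i, prev, d =>
      pvAltLoop nbr_sec xs (i + 1) (some x)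
        (if some x ≠ prev then (d.setdefault x []).modify x [] (fun l => l ++ [i * nbr_sec]) else d)

def dico_zone_nbrminStartswith_alt (li : List String) (nbr_sec : Int) : List (String × List Int) :=
  (pvAltLoop nbr_sec li 1 none PySem.Dict.empty).items

-- ===== PRECONDITION & SPEC =====
def Spec_dico_zone_nbrminStartswith (li : List String) (nbr_sec : Int) (out : List (String × List Int)) : Prop := out = dico_zone_nbrminStartswith_alt li nbr_sec
instance (li : List String) (nbr_sec : Int) (out : List (String × List Int)) : Decidable (Spec_dico_zone_nbrminStartswith li nbr_sec out) := by unfold Spec_dico_zone_nbrminStartswith; infer_instance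

-- ===== CLAIM (what is proved, stated in full; the proofs are below) =====
def Claim_equal_dico_zone_nbrminStartswith : Prop := ∀ (li : List String) (nbr_sec : Int), Dom_dico_zone_nbrminStartswith li nbr_sec → Spec_dico_zone_nbrminStartswith li nbr_sec (dico_zone_nbrminStartswith li nbr_sec)

-- ===== LEMMAS AND PROOFS =====

-- the (value, start-offset) pairs of the runs of a run-length list, first start = s
def pvRstarts : List (String × Int) → Int → List (String × Int)
  | [], _ => []
  | p :: v, s => (p.1, s) :: pvRstarts v (s + p.2)

-- the (value, 1-based index) pairs B emits, scanning from index i with previous element prev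
def pvStarts : List String → Int → Option String → List (String × Int)
  | [], _, _ => []
  | x :: xs, i, prev =>
      if some x ≠ prev then (x, i) :: pvStarts xs (i + 1) (some x)
      else pvStarts xs (i + 1) (some x)

-- A's quadratic prefix-sum comprehension computes pvRstarts
theorem pv_pref_eq_rstarts (v : List (String × Int)) (c : Int) :
    (List.range v.length).map (fun k =>
      ((v.getD k ("", 0)).1, (((List.range k).map (fun j => (v.getD j ("", 0)).2)).sum) + c))
      = pvRstarts v c := by
  induction v generalizing c with
  | nil => simp [pvRstarts]
  | cons p v ih =>
    simp only [pvRstarts, List.length_cons, List.range_succ_eq_map, List.map_cons, List.map_map,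
      List.range_zero, List.map_nil, List.sum_nil, List.getD_cons_zero, zero_add,
      List.cons.injEq]
    refine ⟨by simp, ?_⟩
    rw [← ih (c + p.2)]
    refine List.map_congr_left (fun k _ => ?_)
    simp only [Function.comp_def, Nat.succ_eq_add_one, List.getD_cons_succ,
      List.range_succ_eq_map, List.map_cons, List.map_map, List.sum_cons, List.getD_cons_zero,
      Prod.mk.injEq]
    refine ⟨by simp, by ring⟩

theorem pvSpanEq_head (x : String) (xs : List String) :
    ∀ y, (pvSpanEq x xs).2.head? = some y → y ≠ x := by
  induction xs with
  | nil => simp [pvSpanEq]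
  | cons z zs ih =>
    intro y hy
    by_cases hz : z = x
    · exact ih y (by simpa [pvSpanEq, hz] using hy)
    · simp only [pvSpanEq, if_neg hz, List.head?_cons, Option.some.injEq] at hy
      simpa [hy] using hz

-- B's scan skips the leading run of x's, incrementing the index by the run length
theorem pvStarts_span (x : String) (xs : List String) (s : Int) :
    pvStarts xs s (some x) = pvStarts (pvSpanEq x xs).2 (s + (pvSpanEq x xs).1) (some x) := by
  induction xs generalizing s with
  | nil => simp [pvSpanEq]
  | cons y ys ih =>
    by_cases hy : y = x
    · subst hy
      rw [show pvSpanEq y (y :: ys) = ((pvSpanEq y ys).1 + 1, (pvSpanEq y ys).2) from by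
        simp [pvSpanEq]]
      rw [show pvStarts (y :: ys) s (some y) = pvStarts ys (s + 1) (some y) from by
        simp [pvStarts]]
      rw [ih (s + 1)]
      congr 1
      ring
    · simp [pvSpanEq, hy]

theorem pv_rstarts_groupby_aux (n : Nat) : ∀ (li : List String), li.length ≤ n →
    ∀ (s : Int) (prev : Option String), (∀ y, li.head? = some y → prev ≠ some y) →
    pvRstarts (pvGroupby li) s = pvStarts li s prev := by
  induction n with
  | zero =>
    intro li hli s prev _
    have : li = [] := List.length_eq_zero_iff.mp (Nat.le_zero.mp hli)
    subst this
    simp [pvGroupby, pvRstarts, pvStarts]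
  | succ n ih =>
    intro li hli s prev hprev
    cases li with
    | nil => simp [pvGroupby, pvRstarts, pvStarts]
    | cons x xs =>
      have hne : some x ≠ prev := fun h => (hprev x rfl) h.symm
      simp only [pvGroupby, pvRstarts, pvStarts, if_pos hne]
      congr 1
      · have hlen : (pvSpanEq x xs).2.length ≤ n :=
          Nat.le_trans (pvSpanEq_len x xs) (Nat.succ_le_succ_iff.mp hli)
        rw [ih (pvSpanEq x xs).2 hlen (s + ((pvSpanEq x xs).1 + 1)) (some x)
            (fun y hy hc => pvSpanEq_head x xs y hy (by injection hc with h; exact h.symm))]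
        rw [pvStarts_span x xs (s + 1)]
        congr 1
        ring

-- the two step functions on the dict are the same function
theorem pv_step_eq (nbr_sec : Int) (d : PySem.Dict String (List Int)) (p : String × Int) :
    (if d.contains p.1 then d else d.insert p.1 ([] : List Int)).modify p.1 []
      (fun l => l ++ [p.2 * nbr_sec])
    = (d.setdefault p.1 []).modify p.1 [] (fun l => l ++ [p.2 * nbr_sec]) := by
  by_cases h : d.contains p.1
  · rw [if_pos h, PySem.Dict.setdefault_of_contains d _ h]
  · rw [if_neg h, PySem.Dict.setdefault_of_not_contains d _ (by simpa using h)]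

-- B's loop is the fold of its step over the emitted pairs
theorem pvAltLoop_eq_foldl (nbr_sec : Int) : ∀ (xs : List String) (i : Int) (prev : Option String)
    (d : PySem.Dict String (List Int)),
    pvAltLoop nbr_sec xs i prev d
      = (pvStarts xs i prev).foldl
          (fun d p => (d.setdefault p.1 []).modify p.1 [] (fun l => l ++ [p.2 * nbr_sec])) d := by
  intro xs
  induction xs with
  | nil => intro i prev d; simp [pvAltLoop, pvStarts]
  | cons x xs ih =>
    intro i prev d
    by_cases h : some x ≠ prev
    · simp only [pvAltLoop, pvStarts, if_pos h, List.foldl_cons]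
      exact ih (i + 1) (some x) _
    · simp only [pvAltLoop, pvStarts, if_neg h]
      exact ih (i + 1) (some x) d

-- ===== VERDICT (by name: the statement is the Claim_ definition above) =====
theorem dico_zone_nbrminStartswith_spec : Claim_equal_dico_zone_nbrminStartswith := by
  intro li nbr_sec _
  unfold Spec_dico_zone_nbrminStartswith
  unfold dico_zone_nbrminStartswith dico_zone_nbrminStartswith_alt
  have hpairs :
      (PySem.List.pyRange 0 ((pvGroupby li).length : Int) 1).map (fun i =>
        ((PySem.List.pyGetD (pvGroupby li) i ("", 0)).1,
         ((PySem.List.pyRange 0 i 1).map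
            (fun j => (PySem.List.pyGetD (pvGroupby li) j ("", 0)).2)).sum + 1))
        = pvStarts li 1 none := by
    rw [PySem.List.pyRange_zero_natCast, List.map_map]
    rw [← pv_rstarts_groupby_aux li.length li (Nat.le_refl _) 1 none (by simp)]
    rw [← pv_pref_eq_rstarts (pvGroupby li) 1]
    refine List.map_congr_left (fun k _ => ?_)
    simp [Function.comp_def, PySem.List.pyGetD_natCast, PySem.List.pyRange_zero_natCast,
      List.map_map]
  dsimp only
  rw [hpairs, pvAltLoop_eq_foldl]
  have hstep : (fun (d : PySem.Dict String (List Int)) (p : String × Int) =>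
      (if d.contains p.1 then d else d.insert p.1 ([] : List Int)).modify p.1 []
        (fun l => l ++ [p.2 * nbr_sec]))
    = (fun (d : PySem.Dict String (List Int)) (p : String × Int) =>
      (d.setdefault p.1 []).modify p.1 [] (fun l => l ++ [p.2 * nbr_sec])) :=
    funext fun d => funext fun p => pv_step_eq nbr_sec d p
  rw [hstep]
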